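-- pv_equiv track=rewrite | github.com/Jerrytd579/CS115 | CS115b/musicrecplus.py | findBestUser
-- ===== SOURCE A (Python) =====
-- def findBestUser(currUser, prefs, userMap):
--     ''' Find the user whose tastes are closest to the current
--         user.  Return the best user's name (a string) '''
--     users = userMap.keys()
--     bestUser = None
--     bestScore = -1
--     for user in users:
--         score = numMatches(prefs, userMap[user])
--         if score > bestScore and currUser != user and userMap[currUser] != userMap[user] and user[-1] != '$':
--             bestScore = score
--             bestUser = user
--     return bestUser
--
-- def numMatches(list1, list2):
--     ''' return the number of elements that match between
--         two sorted lists '''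
--     matches = 0
--     i = 0
--     j = 0
--     while i < len(list1) and j < len(list2):
--         if list1[i] == list2[j]:
--             matches += 1
--             i += 1
--             j += 1
--         elif list1[i] < list2[j]:
--             i += 1
--         else:
--             j += 1
--     return matches
-- ===== SOURCE B (Python) =====
-- def mergeCount(list1, list2):
--     ''' count the merge-matches by consuming two stacks
--         (reversed copies, tops at the end) instead of walking indices '''
--     xs = list1[::-1]
--     ys = list2[::-1]
--     matches = 0
--     while xs and ys:
--         if xs[-1] == ys[-1]:
--             matches += 1
--             xs.pop()
--             ys.pop()
--         elif xs[-1] < ys[-1]: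
--             xs.pop()
--         else:
--             ys.pop()
--     return matches
--
-- def findBestUser(currUser, prefs, userMap):
--     ''' single pass over the items with the score of each DISTINCT
--         preference list computed once (memo dict keyed by the list),
--         keeping the best eligible (user, score) pair '''
--     myList = userMap[currUser] if userMap else None
--     scores = {}
--     best = None
--     for user, lst in userMap.items():
--         key = tuple(lst)
--         if key not in scores:
--             scores[key] = mergeCount(prefs, lst)
--         if user == currUser or lst == myList or user.endswith('$'):
--             continue
--         s = scores[key]
--         if best is None or s > best[1]:
--             best = (user, s)
--     return best[0] if best is not None else None
-- ===== Notes on version B (the rewrite author's own statement) =====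
-- stated objective: alternative
-- what changed: findBestUser becomes a single pass over the dict items that memoises the score of each distinct preference list in a dict and keeps the best (user, score) pair, and the index-walking merge of numMatches becomes consumption of two reversed-list stacks.
-- outside the precondition, e.g. on findBestUser('a', [], {'a': ['x'], '': ['x']}): A returns None, B returns None
import Mathlib
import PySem

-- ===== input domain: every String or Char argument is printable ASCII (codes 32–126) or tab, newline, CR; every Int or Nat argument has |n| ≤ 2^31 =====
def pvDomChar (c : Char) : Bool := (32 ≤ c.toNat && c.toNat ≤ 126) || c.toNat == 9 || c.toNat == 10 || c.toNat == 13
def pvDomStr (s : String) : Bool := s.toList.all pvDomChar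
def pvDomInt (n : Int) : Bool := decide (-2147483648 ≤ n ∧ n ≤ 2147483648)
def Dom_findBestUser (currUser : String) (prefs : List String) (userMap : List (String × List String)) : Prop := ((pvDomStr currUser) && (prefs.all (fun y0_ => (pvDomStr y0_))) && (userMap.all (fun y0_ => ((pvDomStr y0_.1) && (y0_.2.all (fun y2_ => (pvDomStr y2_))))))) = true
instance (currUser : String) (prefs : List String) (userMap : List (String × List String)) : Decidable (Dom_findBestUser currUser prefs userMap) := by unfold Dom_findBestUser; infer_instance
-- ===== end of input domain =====

-- B restructures A: one pass over the dict ITEMS with the score of each DISTINCT preference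
-- list computed once into a memo dict, keeping the best (user, score) pair; the index-walking
-- merge becomes stack consumption (objective: alternative decomposition; same worst-case cost).

-- ===== PORT A =====
-- the while-loop of numMatches; i, j start at 0 and only increase, so Nat indices are exact
def nmLoopA (l1 l2 : List String) (i j : Nat) (m : Int) : Int :=
  if h : i < l1.length ∧ j < l2.length then
    if l1[i] = l2[j] then nmLoopA l1 l2 (i+1) (j+1) (m+1)
    else if l1[i] < l2[j] then nmLoopA l1 l2 (i+1) j m
    else nmLoopA l1 l2 i (j+1) m
  else m
termination_by (l1.length - i) + (l2.length - j)

def numMatchesA (list1 list2 : List String) : Int := nmLoopA list1 list2 0 0 0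

-- A's loop body; the `none` fallbacks are where the Python raises (KeyError / IndexError), excluded by Pre_
def stepA (d : PySem.Dict String (List String)) (currUser : String) (prefs : List String)
    (st : Option String × Int) (user : String) : Option String × Int :=
  match d.get? user with
  | none => st                         -- unreachable: user ∈ d.keys
  | some lst =>
    let score := numMatchesA prefs lst
    if score > st.2 ∧ currUser ≠ user then
      match d.get? currUser with
      | none => st                     -- Python: KeyError (outside Pre_)
      | some mine =>
        if mine ≠ lst then
          match PySem.Str.pyGet? user (-1) with
          | none => st                 -- Python: IndexError on user = "" (outside Pre_)
          | some c => if c ≠ '$' then (some user, score) else st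
        else st
    else st

def findBestUser (currUser : String) (prefs : List String) (userMap : List (String × List String)) : Option String :=
  let d := PySem.Dict.ofList userMap
  (d.keys.foldl (stepA d currUser prefs) ((none : Option String), (-1 : Int))).1

-- ===== PORT B =====
-- Source B's stack loop: the Python stacks are the reversed lists with top at the END, so
-- xs[-1] / xs.pop() are exactly head / tail of the remaining (unreversed) elements,
-- which is how the remaining stack contents are represented here (top-first)
def mcLoop : List String → List String → Int → Int
  | x :: xs, y :: ys, m =>
    if x = y then mcLoop xs ys (m + 1)
    else if x < y then mcLoop xs (y :: ys) m
    else mcLoop (x :: xs) ys m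
  | _, _, m => m
termination_by xs ys _ => xs.length + ys.length

def mergeCountB (list1 list2 : List String) : Int := mcLoop list1 list2 0

-- Source B's loop body over one (user, lst) item: memoise the score of lst, skip ineligible
-- users, keep the best (user, score) pair
def stepB (currUser : String) (prefs : List String) (myList : Option (List String))
    (st : PySem.Dict (List String) Int × Option (String × Int))
    (p : String × List String) : PySem.Dict (List String) Int × Option (String × Int) :=
  let scores := if st.1.contains p.2 then st.1 else st.1.insert p.2 (mergeCountB prefs p.2)
  if p.1 = currUser ∨ some p.2 = myList ∨ PySem.Str.endswith p.1 "$" then (scores, st.2)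
  else
    let s := scores.getD p.2 0
    match st.2 with
    | none => (scores, some (p.1, s))
    | some (bu, bs) => if s > bs then (scores, some (p.1, s)) else (scores, some (bu, bs))

def findBestUser_alt (currUser : String) (prefs : List String) (userMap : List (String × List String)) : Option String :=
  let d := PySem.Dict.ofList userMap
  let myList : Option (List String) := if d.items.isEmpty then none else d.get? currUser
  let r := d.items.foldl (stepB currUser prefs myList) (PySem.Dict.empty, none)
  r.2.map (·.1)

-- ===== PRECONDITION & SPEC =====
-- Pre_ excludes inputs where the Python A raises: KeyError when the map is nonempty but currUser is
-- not a key (the first iteration always reaches userMap[currUser]), and IndexError from user[-1] on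
-- an empty user name; requiring every key nonempty is slightly stronger than the exact raise set
-- (an empty-name key whose guard chain never reaches user[-1] also gets excluded).
def Pre_findBestUser (currUser : String) (prefs : List String) (userMap : List (String × List String)) : Prop :=
  (PySem.Dict.ofList userMap).keys = [] ∨
  (((PySem.Dict.ofList userMap).get? currUser).isSome = true ∧
    ∀ u ∈ (PySem.Dict.ofList userMap).keys, u ≠ "")
instance (currUser : String) (prefs : List String) (userMap : List (String × List String)) : Decidable (Pre_findBestUser currUser prefs userMap) := by unfold Pre_findBestUser; infer_instance

def pvWitness_findBestUser : String × List String × (List (String × List String)) :=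
  ("alice", ["a", "b"], [("alice", ["a"]), ("bob", ["a", "b"]), ("eve$", ["a", "b"])])

def Spec_findBestUser (currUser : String) (prefs : List String) (userMap : List (String × List String)) (out : Option String) : Prop := out = findBestUser_alt currUser prefs userMap
instance (currUser : String) (prefs : List String) (userMap : List (String × List String)) (out : Option String) : Decidable (Spec_findBestUser currUser prefs userMap out) := by unfold Spec_findBestUser; infer_instance

-- ===== CLAIM (what is proved, stated in full; the proofs are below) =====
def Claim_equal_findBestUser : Prop := ∀ (currUser : String) (prefs : List String) (userMap : List (String × List String)), Dom_findBestUser currUser prefs userMap → Pre_findBestUser currUser prefs userMap → Spec_findBestUser currUser prefs userMap (findBestUser currUser prefs userMap)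

-- ===== LEMMAS AND PROOFS =====

theorem mcLoop_nil_left (ys : List String) (m : Int) : mcLoop [] ys m = m := by
  rw [mcLoop]
  exact fun x xs y ys' h1 _ => by cases h1

theorem mcLoop_nil_right (xs : List String) (m : Int) : mcLoop xs [] m = m := by
  cases xs with
  | nil => rw [mcLoop]; exact fun x xs y ys h1 _ => by cases h1
  | cons a t => rw [mcLoop]; exact fun x xs y ys _ h2 => by cases h2

-- the two merges agree: A's index loop at (i, j) is B's stack loop on the dropped suffixes
theorem nmLoopA_eq (l1 l2 : List String) (i j : Nat) (m : Int) :
    nmLoopA l1 l2 i j m = mcLoop (l1.drop i) (l2.drop j) m := by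
  fun_induction nmLoopA l1 l2 i j m with
  | case1 i j m h heq ih =>
    rw [ih]
    conv_rhs => rw [List.drop_eq_getElem_cons h.1, List.drop_eq_getElem_cons h.2]
    rw [mcLoop, if_pos heq]
  | case2 i j m h hne hlt ih =>
    rw [ih]
    conv_rhs => rw [List.drop_eq_getElem_cons h.1, List.drop_eq_getElem_cons h.2]
    rw [mcLoop, if_neg hne, if_pos hlt, ← List.drop_eq_getElem_cons h.2]
  | case3 i j m h hne hnlt ih =>
    rw [ih]
    conv_rhs => rw [List.drop_eq_getElem_cons h.1, List.drop_eq_getElem_cons h.2]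
    rw [mcLoop, if_neg hne, if_neg hnlt, ← List.drop_eq_getElem_cons h.1]
  | case4 i j m h =>
    rcases (by omega : l1.length ≤ i ∨ l2.length ≤ j) with h1 | h2
    · rw [List.drop_eq_nil_of_le h1, mcLoop_nil_left]
    · rw [List.drop_eq_nil_of_le h2, mcLoop_nil_right]

theorem numMatchesA_eq (l1 l2 : List String) : numMatchesA l1 l2 = mergeCountB l1 l2 := by
  rw [numMatchesA, nmLoopA_eq]; simp [mergeCountB]

theorem mcLoop_le (l1 l2 : List String) (m : Int) : m ≤ mcLoop l1 l2 m := by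
  fun_induction mcLoop l1 l2 m <;> omega

theorem mergeCountB_nonneg (l1 l2 : List String) : 0 ≤ mergeCountB l1 l2 :=
  mcLoop_le l1 l2 0

theorem strGetNeg1 (u : String) (h : u ≠ "") :
    PySem.Str.pyGet? u (-1) = some (u.toList.getLast (by intro hh; apply h; cases u; simp_all)) := by
  have hne : u.toList ≠ [] := by intro hh; apply h; cases u; simp_all
  have hlen : 0 < u.toList.length := List.length_pos_iff.mpr hne
  simp only [PySem.Str.pyGet?_eq, PySem.Chars.pyGet?_eq_listPyGet?]
  simp only [PySem.List.pyGet?, PySem.List.pyIdx?]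
  rw [if_neg (by omega), if_pos (by omega)]
  simp [List.getLast_eq_getElem]

theorem endswith_dollar (u : String) (h : u.toList ≠ []) :
    PySem.Str.endswith u "$" = (u.toList.getLast h == '$') := by
  have hb : PySem.Str.endswith u "$" = PySem.Chars.endswith u.toList ['$'] := by
    simp [PySem.Str.endswith_eq]
  have hsuf : PySem.Chars.endswith u.toList ['$'] = true ↔ u.toList.getLast h = '$' := by
    rw [PySem.Chars.endswith_iff]
    constructor
    · rintro ⟨t, ht⟩
      have hc : u.toList.getLast? = some '$' := by rw [← ht]; exact List.getLast?_concat
      rw [List.getLast?_eq_some_getLast h] at hc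
      injection hc
    · intro hg
      exact ⟨u.toList.dropLast, by rw [← hg]; exact List.dropLast_append_getLast h⟩
  rcases eq_or_ne (u.toList.getLast h) '$' with he | he
  · rw [hb, hsuf.mpr he, he]; simp
  · have hf : PySem.Chars.endswith u.toList ['$'] = false := by
      rcases Bool.eq_false_or_eq_true (PySem.Chars.endswith u.toList ['$']) with ht | hf
      · exact absurd (hsuf.mp ht) he
      · exact hf
    rw [hb, hf]
    simp [he]

-- correspondence between A's (bestUser, bestScore) pair and Source B's best Option pair
def relAB (stA : Option String × Int) (b : Option (String × Int)) : Prop :=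
  stA.1 = b.map (·.1) ∧ stA.2 = (match b with | none => -1 | some q => q.2) ∧
  (∀ q, b = some q → 0 ≤ q.2)

-- the memo dict only ever holds correct scores
theorem inv_step (prefs : List String) (scores : PySem.Dict (List String) Int) (lst : List String)
    (hinv : ∀ k v, scores.get? k = some v → v = mergeCountB prefs k) :
    (∀ k v, (if scores.contains lst then scores else scores.insert lst (mergeCountB prefs lst)).get? k = some v → v = mergeCountB prefs k) := by
  intro k v
  split_ifs with hcon
  · exact hinv k v
  · rw [PySem.Dict.get?_insert]
    split_ifs with hk
    · rintro ⟨⟩; rw [hk]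
    · exact hinv k v

theorem memo_lookup (prefs : List String) (scores : PySem.Dict (List String) Int) (lst : List String)
    (hinv : ∀ k v, scores.get? k = some v → v = mergeCountB prefs k) :
    (if scores.contains lst then scores else scores.insert lst (mergeCountB prefs lst)).getD lst 0 = mergeCountB prefs lst := by
  split_ifs with hcon
  · have hs : (scores.get? lst).isSome = true := by rw [← PySem.Dict.contains_eq_isSome_get?]; exact hcon
    obtain ⟨v, hv⟩ := Option.isSome_iff_exists.mp hs
    rw [PySem.Dict.getD_eq_get?_getD, hv]
    exact hinv lst v hv
  · rw [PySem.Dict.getD_insert_self]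

-- the two projections of one stepB application, written out
theorem stepB_fst (currUser : String) (prefs : List String) (myList : Option (List String))
    (scores : PySem.Dict (List String) Int) (b : Option (String × Int)) (p : String × List String) :
    (stepB currUser prefs myList (scores, b) p).1
      = (if scores.contains p.2 then scores else scores.insert p.2 (mergeCountB prefs p.2)) := by
  simp only [stepB]
  cases b with
  | none => split_ifs <;> rfl
  | some q => obtain ⟨bu, bs⟩ := q; dsimp only; split_ifs <;> rfl

theorem stepB_snd (currUser : String) (prefs : List String) (myList : Option (List String))
    (scores : PySem.Dict (List String) Int) (b : Option (String × Int)) (u : String) (lst : List String) :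
    (stepB currUser prefs myList (scores, b) (u, lst)).2
      = if u = currUser ∨ some lst = myList ∨ PySem.Str.endswith u "$" then b
        else match b with
          | none => some (u, (if scores.contains lst then scores else scores.insert lst (mergeCountB prefs lst)).getD lst 0)
          | some q =>
            if (if scores.contains lst then scores else scores.insert lst (mergeCountB prefs lst)).getD lst 0 > q.2
            then some (u, (if scores.contains lst then scores else scores.insert lst (mergeCountB prefs lst)).getD lst 0)
            else some q := by
  simp only [stepB]
  cases b with
  | none => split_ifs <;> rfl
  | some q => obtain ⟨bu, bs⟩ := q; dsimp only; split_ifs <;> rfl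

-- one item: A's guarded step and Source B's memoised step move corresponding states to corresponding states
theorem step_corr (d : PySem.Dict String (List String)) (currUser : String) (prefs : List String)
    (mine : List String) (hc : d.get? currUser = some mine)
    (u : String) (lst : List String) (hu : d.get? u = some lst) (hne : u ≠ "")
    (stA : Option String × Int) (scores : PySem.Dict (List String) Int) (b : Option (String × Int))
    (hinv : ∀ k v, scores.get? k = some v → v = mergeCountB prefs k)
    (hrel : relAB stA b) :
    relAB (stepA d currUser prefs stA u) ((stepB currUser prefs (some mine) (scores, b) (u, lst)).2) := by
  have hnel : u.toList ≠ [] := fun hh => hne (by cases u; simp_all)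
  have hget := strGetNeg1 u hne
  have hend := endswith_dollar u hnel
  obtain ⟨h1, h2, h3⟩ := hrel
  rw [stepB_snd, memo_lookup prefs scores lst hinv]
  have hA : stepA d currUser prefs stA u
      = if mergeCountB prefs lst > stA.2 ∧ currUser ≠ u then
          (if mine ≠ lst then
            (if u.toList.getLast hnel ≠ '$' then (some u, mergeCountB prefs lst) else stA)
          else stA)
        else stA := by
    rw [stepA]
    simp only [hu, hc, hget, numMatchesA_eq]
  rw [hA]
  by_cases g1 : u = currUser
  · rw [if_neg (fun hh => hh.2 g1.symm), if_pos (Or.inl g1)]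
    exact ⟨h1, h2, h3⟩
  · by_cases g2 : lst = mine
    · have hAeq : (if mergeCountB prefs lst > stA.2 ∧ currUser ≠ u then
          (if mine ≠ lst then
            (if u.toList.getLast hnel ≠ '$' then (some u, mergeCountB prefs lst) else stA)
          else stA) else stA) = stA := by
        rw [g2]; simp
      rw [hAeq, if_pos (Or.inr (Or.inl (by rw [g2])))]
      exact ⟨h1, h2, h3⟩
    · by_cases g3 : u.toList.getLast hnel = '$'
      · have hAeq : (if mergeCountB prefs lst > stA.2 ∧ currUser ≠ u then
            (if mine ≠ lst then
              (if u.toList.getLast hnel ≠ '$' then (some u, mergeCountB prefs lst) else stA)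
            else stA) else stA) = stA := by
          simp [g3]
        rw [hAeq, if_pos (Or.inr (Or.inr (by rw [hend]; simp [g3])))]
        exact ⟨h1, h2, h3⟩
      · have hcu : currUser ≠ u := fun hh => g1 hh.symm
        have hml : mine ≠ lst := fun hh => g2 hh.symm
        rw [if_neg (show ¬(u = currUser ∨ some lst = some mine ∨ PySem.Str.endswith u "$" = true) from by
          rintro (hh | hh | hh)
          · exact g1 hh
          · exact g2 (by injection hh)
          · rw [hend] at hh; simp only [beq_iff_eq] at hh; exact g3 hh)]
        cases b with
        | none =>
          dsimp only
          have hb2 : stA.2 = -1 := h2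
          rw [if_pos ⟨by rw [hb2]; have := mergeCountB_nonneg prefs lst; omega, hcu⟩,
              if_pos hml, if_pos g3]
          exact ⟨by simp, by simp, by rintro q ⟨⟩; exact mergeCountB_nonneg prefs lst⟩
        | some q =>
          obtain ⟨bu, bs⟩ := q
          dsimp only
          have hb2 : stA.2 = bs := h2
          by_cases hgt : mergeCountB prefs lst > bs
          · rw [if_pos ⟨by rw [hb2]; exact hgt, hcu⟩, if_pos hml, if_pos g3, if_pos hgt]
            exact ⟨by simp, by simp, by rintro p ⟨⟩; exact mergeCountB_nonneg prefs lst⟩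
          · rw [if_neg (fun hh => hgt (hb2 ▸ hh.1)), if_neg hgt]
            exact ⟨h1, h2, h3⟩

-- the whole pass: A's fold over the keys tracks Source B's fold over the items
theorem fold_corr (d : PySem.Dict String (List String)) (currUser : String) (prefs : List String)
    (mine : List String) (hc : d.get? currUser = some mine)
    (l : List (String × List String)) (hl : ∀ p ∈ l, d.get? p.1 = some p.2 ∧ p.1 ≠ "")
    (stA : Option String × Int) (scores : PySem.Dict (List String) Int) (b : Option (String × Int))
    (hinv : ∀ k v, scores.get? k = some v → v = mergeCountB prefs k)
    (hrel : relAB stA b) :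
    relAB ((l.map (·.1)).foldl (stepA d currUser prefs) stA)
      ((l.foldl (stepB currUser prefs (some mine)) (scores, b)).2) := by
  induction l generalizing stA scores b with
  | nil => exact hrel
  | cons p l ih =>
    obtain ⟨u, lst⟩ := p
    obtain ⟨hu, hne⟩ := hl (u, lst) (by simp)
    simp only [List.map_cons, List.foldl_cons]
    have hx : stepB currUser prefs (some mine) (scores, b) (u, lst)
        = ((if scores.contains lst then scores else scores.insert lst (mergeCountB prefs lst)),
           (stepB currUser prefs (some mine) (scores, b) (u, lst)).2) := by
      rw [← stepB_fst currUser prefs (some mine) scores b (u, lst)]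
    rw [hx]
    exact ih (fun q hq => hl q (by simp [hq])) _ _ _
      (inv_step prefs scores lst hinv)
      (step_corr d currUser prefs mine hc u lst hu hne stA scores b hinv ⟨hrel.1, hrel.2.1, hrel.2.2⟩)

theorem get?_of_item (d : PySem.Dict String (List String)) (hnd : d.keys.Nodup)
    (p : String × List String) (hp : p ∈ d.items) : d.get? p.1 = some p.2 :=
  PySem.Dict.get?_of_mem_items d (by simpa using hp) hnd

-- ===== VERDICT (by name: the statement is the Claim_ definition above) =====
theorem findBestUser_spec : Claim_equal_findBestUser := by
  intro currUser prefs userMap _ hpre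
  unfold Spec_findBestUser
  rcases hpre with hk | ⟨hsome, hall⟩
  · have hit : (PySem.Dict.ofList userMap).items = [] := by
      have := hk; simpa [PySem.Dict.keys] using this
    simp [findBestUser, findBestUser_alt, hk, hit]
  · obtain ⟨mine, hc⟩ := Option.isSome_iff_exists.mp hsome
    have hnd : (PySem.Dict.ofList userMap).keys.Nodup := PySem.Dict.nodup_keys_ofList userMap
    have hitne : ((PySem.Dict.ofList userMap).items.isEmpty) = false := by
      rw [List.isEmpty_eq_false_iff]
      intro hit
      have : (PySem.Dict.ofList userMap).get? currUser = none := by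
        simp [PySem.Dict.get?_eq_none_iff_not_mem_keys, PySem.Dict.keys, hit]
      simp [this] at hc
    rw [findBestUser, findBestUser_alt]
    simp only [hitne, Bool.false_eq_true, if_false, hc]
    have hkeys : (PySem.Dict.ofList userMap).keys = (PySem.Dict.ofList userMap).items.map (·.1) := by
      simp [PySem.Dict.keys]
    have hl : ∀ p ∈ (PySem.Dict.ofList userMap).items,
        (PySem.Dict.ofList userMap).get? p.1 = some p.2 ∧ p.1 ≠ "" := by
      intro p hp
      refine ⟨get?_of_item _ hnd p hp, ?_⟩
      apply hall
      rw [hkeys]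
      exact List.mem_map.mpr ⟨p, hp, rfl⟩
    have := fold_corr (PySem.Dict.ofList userMap) currUser prefs mine hc
      (PySem.Dict.ofList userMap).items hl ((none : Option String), (-1 : Int))
      PySem.Dict.empty none (by intro k v h; simp [PySem.Dict.get?_empty] at h)
      ⟨by simp, by simp, by simp⟩
    rw [hkeys]
    exact this.1
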